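-- pv_equiv track=rewrite | github.com/sgrubas/cats | cats/core/clustering.py | sort_feature_names
-- ===== SOURCE A (Python) =====
-- def sort_feature_names(cols):
--     sorted_cols = ["Cluster_ID"]
--     sorted_cols += [ci for ci in cols if "time" in ci.casefold() and ci not in sorted_cols]
--     sorted_cols += [ci for ci in cols if "frequency" in ci.casefold() and ci not in sorted_cols]
--     sorted_cols += [ci for ci in ["First_arrival", "Strong_arrival"] if ci in cols]
--     sorted_cols += [ci for ci in cols if "energy" in ci.casefold() and ci not in sorted_cols]
--     sorted_cols += [ci for ci in cols if "ellipse" in ci.casefold() and ci not in sorted_cols]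
--     sorted_cols += [ci for ci in cols if ci not in sorted_cols]
--     return sorted_cols
-- ===== SOURCE B (Python) =====
-- def sort_feature_names(cols):
--     # Single classify-into-buckets pass instead of six repeated membership-filtered scans.
--     def rank(ci):
--         c = ci.casefold()
--         if "time" in c:
--             return 0
--         if "frequency" in c:
--             return 1
--         if ci == "First_arrival":
--             return 2
--         if ci == "Strong_arrival":
--             return 3
--         if "energy" in c:
--             return 4
--         if "ellipse" in c:
--             return 5
--         return 6
--
--     buckets = [[] for _ in range(7)]
--     for ci in cols:
--         if ci == "Cluster_ID":
--             continue
--         r = rank(ci)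
--         if r in (2, 3) and buckets[r]:
--             continue  # the two arrival markers appear at most once
--         buckets[r].append(ci)
--     out = ["Cluster_ID"]
--     for b in buckets:
--         out += b
--     return out
-- ===== Notes on version B (the rewrite author's own statement) =====
-- stated objective: alternative
-- what changed: Replaces A's six separate membership-filtered scans of cols (each testing 'ci not in sorted_cols' against a growing list) with a single pass that classifies every column by a rank function into seven buckets and concatenates them; it trades repeated list-membership scans for one dispatch per element.
import Mathlib
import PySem

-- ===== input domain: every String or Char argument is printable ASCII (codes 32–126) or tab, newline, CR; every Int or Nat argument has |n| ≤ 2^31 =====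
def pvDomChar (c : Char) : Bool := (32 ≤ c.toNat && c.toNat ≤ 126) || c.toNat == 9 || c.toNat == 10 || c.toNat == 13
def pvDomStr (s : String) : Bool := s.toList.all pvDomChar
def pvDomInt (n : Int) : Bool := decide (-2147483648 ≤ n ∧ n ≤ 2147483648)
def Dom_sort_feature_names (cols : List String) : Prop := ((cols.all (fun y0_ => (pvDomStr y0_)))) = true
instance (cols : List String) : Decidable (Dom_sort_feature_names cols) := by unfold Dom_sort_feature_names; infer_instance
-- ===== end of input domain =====

-- B replaces A's six membership-filtered scans of cols by a single classify-into-buckets pass.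

-- ===== PORT A =====
def sort_feature_names (cols : List String) : List String :=
  let s0 : List String := ["Cluster_ID"]
  let s1 := s0 ++ cols.filter (fun ci => PySem.Str.isIn "time" (PySem.Str.lower ci) && !(s0.contains ci))
  let s2 := s1 ++ cols.filter (fun ci => PySem.Str.isIn "frequency" (PySem.Str.lower ci) && !(s1.contains ci))
  let s3 := s2 ++ (["First_arrival", "Strong_arrival"].filter (fun ci => cols.contains ci))
  let s4 := s3 ++ cols.filter (fun ci => PySem.Str.isIn "energy" (PySem.Str.lower ci) && !(s3.contains ci))
  let s5 := s4 ++ cols.filter (fun ci => PySem.Str.isIn "ellipse" (PySem.Str.lower ci) && !(s4.contains ci))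
  s5 ++ cols.filter (fun ci => !(s5.contains ci))

-- ===== PORT B =====
-- rank(ci) from Source B
def sfnRank (ci : String) : Nat :=
  let c := PySem.Str.lower ci
  if PySem.Str.isIn "time" c then 0
  else if PySem.Str.isIn "frequency" c then 1
  else if ci = "First_arrival" then 2
  else if ci = "Strong_arrival" then 3
  else if PySem.Str.isIn "energy" c then 4
  else if PySem.Str.isIn "ellipse" c then 5
  else 6

-- the seven buckets of Source B's single pass
structure SfnBuckets where
  b0 : List String
  b1 : List String
  b2 : List String
  b3 : List String
  b4 : List String
  b5 : List String
  b6 : List String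
deriving Repr, DecidableEq

-- one loop iteration of Source B (dispatch on r = rank ci; ranks 2/3 are kept at most once)
def sfnStep (st : SfnBuckets) (ci : String) : SfnBuckets :=
  if ci = "Cluster_ID" then st
  else
    let r := sfnRank ci
    if r = 0 then { st with b0 := st.b0 ++ [ci] }
    else if r = 1 then { st with b1 := st.b1 ++ [ci] }
    else if r = 2 then (if st.b2 ≠ [] then st else { st with b2 := st.b2 ++ [ci] })
    else if r = 3 then (if st.b3 ≠ [] then st else { st with b3 := st.b3 ++ [ci] })
    else if r = 4 then { st with b4 := st.b4 ++ [ci] }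
    else if r = 5 then { st with b5 := st.b5 ++ [ci] }
    else { st with b6 := st.b6 ++ [ci] }

def sort_feature_names_alt (cols : List String) : List String :=
  let st := cols.foldl sfnStep ⟨[], [], [], [], [], [], []⟩
  "Cluster_ID" :: (st.b0 ++ st.b1 ++ st.b2 ++ st.b3 ++ st.b4 ++ st.b5 ++ st.b6)

-- ===== PRECONDITION & SPEC =====
def Spec_sort_feature_names (cols : List String) (out : List String) : Prop := out = sort_feature_names_alt cols
instance (cols : List String) (out : List String) : Decidable (Spec_sort_feature_names cols out) := by unfold Spec_sort_feature_names; infer_instance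

-- ===== CLAIM (what is proved, stated in full; the proofs are below) =====
def Claim_equal_sort_feature_names : Prop := ∀ (cols : List String), Dom_sort_feature_names cols → Spec_sort_feature_names cols (sort_feature_names cols)

-- ===== LEMMAS AND PROOFS =====

theorem sfnRank_cases (ci : String) :
    sfnRank ci = 0 ∨ sfnRank ci = 1 ∨ sfnRank ci = 2 ∨ sfnRank ci = 3 ∨
    sfnRank ci = 4 ∨ sfnRank ci = 5 ∨ sfnRank ci = 6 := by
  simp only [sfnRank]; split_ifs <;> simp

theorem sfnRank_eq_two (ci : String) : sfnRank ci = 2 ↔ ci = "First_arrival" := by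
  constructor
  · intro h; by_contra hne
    simp only [sfnRank] at h; split_ifs at h <;> simp_all
  · rintro rfl; decide

theorem sfnRank_eq_three (ci : String) : sfnRank ci = 3 ↔ ci = "Strong_arrival" := by
  constructor
  · intro h; by_contra hne
    simp only [sfnRank] at h; split_ifs at h <;> simp_all
  · rintro rfl; decide

theorem sfn_foldl_inv (l : List String) (st : SfnBuckets) :
    l.foldl sfnStep st =
      ⟨ st.b0 ++ l.filter (fun ci => sfnRank ci == 0),
        st.b1 ++ l.filter (fun ci => sfnRank ci == 1),
        if st.b2 = [] then (if l.contains "First_arrival" then ["First_arrival"] else []) else st.b2,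
        if st.b3 = [] then (if l.contains "Strong_arrival" then ["Strong_arrival"] else []) else st.b3,
        st.b4 ++ l.filter (fun ci => sfnRank ci == 4),
        st.b5 ++ l.filter (fun ci => sfnRank ci == 5),
        st.b6 ++ l.filter (fun ci => !(ci == "Cluster_ID") && sfnRank ci == 6) ⟩ := by
  induction l generalizing st with
  | nil =>
    cases st with
    | mk b0 b1 b2 b3 b4 b5 b6 =>
      simp [List.foldl]
  | cons ci l ih =>
    rw [List.foldl_cons, ih]
    by_cases hc : ci = "Cluster_ID"
    · subst hc
      simp [sfnStep, List.filter_cons, sfnRank]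
      decide
    · rcases sfnRank_cases ci with hr | hr | hr | hr | hr | hr | hr
      · -- rank 0
        simp [sfnStep, hc, hr]
        have hF : ¬ ("First_arrival" = ci) :=
          fun h => (by omega : sfnRank ci ≠ 2) ((sfnRank_eq_two ci).mpr h.symm)
        have hS : ¬ ("Strong_arrival" = ci) :=
          fun h => (by omega : sfnRank ci ≠ 3) ((sfnRank_eq_three ci).mpr h.symm)
        simp [hF, hS]
      · -- rank 1
        simp [sfnStep, hc, hr]
        have hF : ¬ ("First_arrival" = ci) :=
          fun h => (by omega : sfnRank ci ≠ 2) ((sfnRank_eq_two ci).mpr h.symm)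
        have hS : ¬ ("Strong_arrival" = ci) :=
          fun h => (by omega : sfnRank ci ≠ 3) ((sfnRank_eq_three ci).mpr h.symm)
        simp [hF, hS]
      · -- rank 2: ci = "First_arrival"
        have hciF := (sfnRank_eq_two ci).mp hr
        subst hciF
        by_cases hb : st.b2 = [] <;>
          simp [sfnStep, hr, hb]
      · -- rank 3
        have hciS := (sfnRank_eq_three ci).mp hr
        subst hciS
        by_cases hb : st.b3 = [] <;>
          simp [sfnStep, hr, hb]
      · -- rank 4
        simp [sfnStep, hc, hr]
        have hF : ¬ ("First_arrival" = ci) :=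
          fun h => (by omega : sfnRank ci ≠ 2) ((sfnRank_eq_two ci).mpr h.symm)
        have hS : ¬ ("Strong_arrival" = ci) :=
          fun h => (by omega : sfnRank ci ≠ 3) ((sfnRank_eq_three ci).mpr h.symm)
        simp [hF, hS]
      · -- rank 5
        simp [sfnStep, hc, hr]
        have hF : ¬ ("First_arrival" = ci) :=
          fun h => (by omega : sfnRank ci ≠ 2) ((sfnRank_eq_two ci).mpr h.symm)
        have hS : ¬ ("Strong_arrival" = ci) :=
          fun h => (by omega : sfnRank ci ≠ 3) ((sfnRank_eq_three ci).mpr h.symm)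
        simp [hF, hS]
      · -- rank 6
        simp [sfnStep, hc, hr]
        have hF : ¬ ("First_arrival" = ci) :=
          fun h => (by omega : sfnRank ci ≠ 2) ((sfnRank_eq_two ci).mpr h.symm)
        have hS : ¬ ("Strong_arrival" = ci) :=
          fun h => (by omega : sfnRank ci ≠ 3) ((sfnRank_eq_three ci).mpr h.symm)
        simp [hF, hS]

theorem sfnRank_eq_zero (ci : String) :
    (sfnRank ci == 0) = PySem.Str.isIn "time" (PySem.Str.lower ci) := by
  simp only [sfnRank]; split_ifs <;> simp_all

theorem sfnRank_eq_one (ci : String) :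
    (sfnRank ci == 1) =
      (PySem.Str.isIn "frequency" (PySem.Str.lower ci) &&
        !PySem.Str.isIn "time" (PySem.Str.lower ci)) := by
  simp only [sfnRank]; split_ifs <;> simp_all

theorem sfnRank_eq_four (ci : String) :
    (sfnRank ci == 4) =
      (PySem.Str.isIn "energy" (PySem.Str.lower ci) &&
        !PySem.Str.isIn "time" (PySem.Str.lower ci) &&
        !PySem.Str.isIn "frequency" (PySem.Str.lower ci)) := by
  simp only [sfnRank]
  split_ifs <;> simp_all <;> decide

theorem sfnRank_eq_five (ci : String) :
    (sfnRank ci == 5) =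
      (PySem.Str.isIn "ellipse" (PySem.Str.lower ci) &&
        !PySem.Str.isIn "time" (PySem.Str.lower ci) &&
        !PySem.Str.isIn "frequency" (PySem.Str.lower ci) &&
        !PySem.Str.isIn "energy" (PySem.Str.lower ci)) := by
  simp only [sfnRank]
  split_ifs <;> simp_all <;> decide

theorem sfnRank_eq_six (ci : String) :
    (sfnRank ci == 6) =
      (!PySem.Str.isIn "time" (PySem.Str.lower ci) &&
        !PySem.Str.isIn "frequency" (PySem.Str.lower ci) &&
        !(ci == "First_arrival") && !(ci == "Strong_arrival") &&
        !PySem.Str.isIn "energy" (PySem.Str.lower ci) &&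
        !PySem.Str.isIn "ellipse" (PySem.Str.lower ci)) := by
  simp only [sfnRank]
  split_ifs <;> simp_all

theorem sfnA_eq (cols : List String) :
    sort_feature_names cols =
      "Cluster_ID" ::
        (cols.filter (fun ci => sfnRank ci == 0) ++
         cols.filter (fun ci => sfnRank ci == 1) ++
         (if cols.contains "First_arrival" then ["First_arrival"] else []) ++
         (if cols.contains "Strong_arrival" then ["Strong_arrival"] else []) ++
         cols.filter (fun ci => sfnRank ci == 4) ++
         cols.filter (fun ci => sfnRank ci == 5) ++
         cols.filter (fun ci => !(ci == "Cluster_ID") && sfnRank ci == 6)) := by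
  have L0 : cols.filter
      (fun ci => PySem.Str.isIn "time" (PySem.Str.lower ci) && !((["Cluster_ID"] : List String).contains ci))
      = cols.filter (fun ci => sfnRank ci == 0) := by
    apply List.filter_congr
    intro ci hci
    rw [sfnRank_eq_zero]
    by_cases hc : ci = "Cluster_ID"
    · subst hc; decide
    · simp [hc]
  have L1 : cols.filter
      (fun ci => PySem.Str.isIn "frequency" (PySem.Str.lower ci) &&
        !((("Cluster_ID" :: cols.filter (fun ci => sfnRank ci == 0)) : List String).contains ci))
      = cols.filter (fun ci => sfnRank ci == 1) := by
    apply List.filter_congr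
    intro ci hci
    rw [sfnRank_eq_one]
    by_cases hc : ci = "Cluster_ID"
    · subst hc
      simp
      decide
    · simp [List.mem_filter, hc, hci, sfnRank_eq_zero]
  have Larr : (["First_arrival", "Strong_arrival"] : List String).filter (fun ci => cols.contains ci)
      = (if cols.contains "First_arrival" then ["First_arrival"] else []) ++
        (if cols.contains "Strong_arrival" then ["Strong_arrival"] else []) := by
    by_cases h1 : "First_arrival" ∈ cols <;>
      by_cases h2 : "Strong_arrival" ∈ cols <;>
        simp [h1, h2]
  have L4 : cols.filter
      (fun ci => PySem.Str.isIn "energy" (PySem.Str.lower ci) &&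
        !((("Cluster_ID" :: (cols.filter (fun ci => sfnRank ci == 0) ++
            (cols.filter (fun ci => sfnRank ci == 1) ++
             ((if cols.contains "First_arrival" then ["First_arrival"] else []) ++
              (if cols.contains "Strong_arrival" then ["Strong_arrival"] else []))))) : List String).contains ci))
      = cols.filter (fun ci => sfnRank ci == 4) := by
    apply List.filter_congr
    intro ci hci
    rw [sfnRank_eq_four]
    by_cases hc : ci = "Cluster_ID"
    · subst hc; simp; decide
    · by_cases hf : ci = "First_arrival"
      · subst hf; simp [hci]; decide
      · by_cases hs : ci = "Strong_arrival"
        · subst hs; simp [hci]; decide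
        · by_cases hmF : "First_arrival" ∈ cols <;>
            by_cases hmS : "Strong_arrival" ∈ cols <;>
              simp [List.contains_iff_mem, List.mem_filter, hc, hf, hs, hci, hmF, hmS,
                sfnRank_eq_zero, sfnRank_eq_one] <;>
              cases hT : PySem.Chars.isIn ['t','i','m','e'] (PySem.Chars.lower ci.toList) <;>
                cases hF2 : PySem.Chars.isIn ['f','r','e','q','u','e','n','c','y'] (PySem.Chars.lower ci.toList) <;>
                  simp [hF2]
  have L5 : cols.filter
      (fun ci => PySem.Str.isIn "ellipse" (PySem.Str.lower ci) &&
        !((("Cluster_ID" :: (cols.filter (fun ci => sfnRank ci == 0) ++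
            (cols.filter (fun ci => sfnRank ci == 1) ++
             ((if cols.contains "First_arrival" then ["First_arrival"] else []) ++
              ((if cols.contains "Strong_arrival" then ["Strong_arrival"] else []) ++
               cols.filter (fun ci => sfnRank ci == 4)))))) : List String).contains ci))
      = cols.filter (fun ci => sfnRank ci == 5) := by
    apply List.filter_congr
    intro ci hci
    rw [sfnRank_eq_five]
    by_cases hc : ci = "Cluster_ID"
    · subst hc; simp; decide
    · by_cases hf : ci = "First_arrival"
      · subst hf; simp [hci]; decide
      · by_cases hs : ci = "Strong_arrival"
        · subst hs; simp [hci]; decide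
        · by_cases hmF : "First_arrival" ∈ cols <;>
            by_cases hmS : "Strong_arrival" ∈ cols <;>
              simp [List.mem_filter, hc, hf, hs, hci, hmF, hmS,
                sfnRank_eq_zero, sfnRank_eq_one, sfnRank_eq_four] <;>
              cases hT : PySem.Chars.isIn ['t','i','m','e'] (PySem.Chars.lower ci.toList) <;>
                cases hF2 : PySem.Chars.isIn ['f','r','e','q','u','e','n','c','y'] (PySem.Chars.lower ci.toList) <;>
                  cases hE : PySem.Chars.isIn ['e','n','e','r','g','y'] (PySem.Chars.lower ci.toList) <;>
                    simp [hT, hF2, hE]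
  have L6 : cols.filter
      (fun ci =>
        !((("Cluster_ID" :: (cols.filter (fun ci => sfnRank ci == 0) ++
            (cols.filter (fun ci => sfnRank ci == 1) ++
             ((if cols.contains "First_arrival" then ["First_arrival"] else []) ++
              ((if cols.contains "Strong_arrival" then ["Strong_arrival"] else []) ++
               (cols.filter (fun ci => sfnRank ci == 4) ++
                cols.filter (fun ci => sfnRank ci == 5))))))) : List String).contains ci))
      = cols.filter (fun ci => !(ci == "Cluster_ID") && sfnRank ci == 6) := by
    apply List.filter_congr
    intro ci hci
    by_cases hc : ci = "Cluster_ID"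
    · subst hc; simp
    · by_cases hf : ci = "First_arrival"
      · subst hf; simp [hci]; decide
      · by_cases hs : ci = "Strong_arrival"
        · subst hs; simp [hci]; decide
        · by_cases hmF : "First_arrival" ∈ cols <;>
            by_cases hmS : "Strong_arrival" ∈ cols <;>
              simp [List.mem_filter, hc, hf, hs, hci, hmF, hmS,
                sfnRank_eq_zero, sfnRank_eq_one, sfnRank_eq_four, sfnRank_eq_five, sfnRank_eq_six] <;>
              cases hT : PySem.Chars.isIn ['t','i','m','e'] (PySem.Chars.lower ci.toList) <;>
                cases hF2 : PySem.Chars.isIn ['f','r','e','q','u','e','n','c','y'] (PySem.Chars.lower ci.toList) <;>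
                  cases hE : PySem.Chars.isIn ['e','n','e','r','g','y'] (PySem.Chars.lower ci.toList) <;>
                    cases hL : PySem.Chars.isIn ['e','l','l','i','p','s','e'] (PySem.Chars.lower ci.toList) <;>
                      simp [hT, hF2, hE, hL, hc, hf, hs]
  simp only [sort_feature_names]
  rw [L0]
  simp only [List.singleton_append, List.cons_append, List.nil_append, List.append_assoc]
  rw [L1, Larr]
  simp only [List.append_assoc]
  rw [L4]
  rw [L5]
  rw [L6]

theorem sfnB_eq (cols : List String) :
    sort_feature_names_alt cols =
      "Cluster_ID" ::
        (cols.filter (fun ci => sfnRank ci == 0) ++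
         cols.filter (fun ci => sfnRank ci == 1) ++
         (if cols.contains "First_arrival" then ["First_arrival"] else []) ++
         (if cols.contains "Strong_arrival" then ["Strong_arrival"] else []) ++
         cols.filter (fun ci => sfnRank ci == 4) ++
         cols.filter (fun ci => sfnRank ci == 5) ++
         cols.filter (fun ci => !(ci == "Cluster_ID") && sfnRank ci == 6)) := by
  unfold sort_feature_names_alt
  rw [sfn_foldl_inv]
  simp

-- ===== VERDICT (by name: the statement is the Claim_ definition above) =====
theorem sort_feature_names_spec : Claim_equal_sort_feature_names := by
  intro cols _
  unfold Spec_sort_feature_names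
  rw [sfnA_eq, sfnB_eq]
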